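-- pv_equiv track=rewrite | github.com/sdfim/leetcode-solutions | linked_list/ADVANCED/minimum_pair_removal_to_sort_array_ii.py | minRemovals
-- ===== SOURCE A (Python) =====
-- from typing import List
--
-- def minRemovals(nums: List[int]) -> int:
--     stack = []
--     removals = 0
--
--     for num in nums:
--         while stack and stack[-1] > num:
--             stack.pop()
--             removals += 1
--         stack.append(num)
--
--     return removals
-- ===== SOURCE B (Python) =====
-- from typing import List
--
-- def minRemovals(nums: List[int]) -> int:
--     # count elements that have a strictly smaller element somewhere after them,
--     # via one right-to-left pass keeping a running suffix minimum
--     removals = 0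
--     m = None
--     for num in reversed(nums):
--         if m is not None and num > m:
--             removals += 1
--         m = num if m is None else min(m, num)
--     return removals
-- ===== Notes on version B (the rewrite author's own statement) =====
-- stated objective: alternative
-- what changed: Replaces the left-to-right stack with pop-counting by a single right-to-left pass that keeps only a scalar running suffix minimum and counts elements strictly greater than it.
import Mathlib
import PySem

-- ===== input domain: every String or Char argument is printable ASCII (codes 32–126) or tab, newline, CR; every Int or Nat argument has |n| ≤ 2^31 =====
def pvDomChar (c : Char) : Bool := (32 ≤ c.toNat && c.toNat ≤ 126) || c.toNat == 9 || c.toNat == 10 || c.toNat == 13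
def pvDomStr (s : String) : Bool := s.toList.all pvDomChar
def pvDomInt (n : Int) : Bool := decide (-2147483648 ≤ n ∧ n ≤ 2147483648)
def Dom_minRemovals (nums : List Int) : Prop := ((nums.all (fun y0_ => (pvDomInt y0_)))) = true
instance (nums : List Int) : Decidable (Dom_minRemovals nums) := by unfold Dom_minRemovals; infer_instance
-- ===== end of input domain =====

-- B replaces A's stack-with-pop-counting by a right-to-left pass keeping only a scalar suffix minimum (alternative decomposition, O(1) extra space).


-- ===== PORT A =====
-- the inner `while stack and stack[-1] > num: stack.pop(); removals += 1` loop
-- (the stack is held head-first: head = Python's stack[-1])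
def popLoop (stack : List Int) (num : Int) (rem : Int) : List Int × Int :=
  match stack with
  | [] => ([], rem)
  | x :: xs => if num < x then popLoop xs num (rem + 1) else (x :: xs, rem)

def stepA (st : List Int × Int) (num : Int) : List Int × Int :=
  let p := popLoop st.1 num st.2
  (num :: p.1, p.2)

def minRemovals (nums : List Int) : Int :=
  (nums.foldl stepA ([], 0)).2

-- ===== PORT B =====
-- one step of the reversed loop: m is None ↦ none; `if num > m: removals += 1`, then m := min(m, num)
def stepB (st : Option Int × Int) (num : Int) : Option Int × Int :=
  match st.1 with
  | none => (some num, st.2)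
  | some m => (some (min m num), if m < num then st.2 + 1 else st.2)

def minRemovals_alt (nums : List Int) : Int :=
  (nums.reverse.foldl stepB (none, 0)).2

-- ===== PRECONDITION & SPEC =====
def Spec_minRemovals (nums : List Int) (out : Int) : Prop := out = minRemovals_alt nums
instance (nums : List Int) (out : Int) : Decidable (Spec_minRemovals nums out) := by unfold Spec_minRemovals; infer_instance

-- ===== CLAIM (what is proved, stated in full; the proofs are below) =====
def Claim_equal_minRemovals : Prop := ∀ (nums : List Int), Dom_minRemovals nums → Spec_minRemovals nums (minRemovals nums)

-- ===== LEMMAS AND PROOFS =====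

-- common specification: number of elements with a strictly smaller element after them
def specCount : List Int → Int
  | [] => 0
  | x :: xs => (if xs.any (fun u => u < x) then 1 else 0) + specCount xs

-- ---- A side ----

theorem popLoop_spec (num : Int) : ∀ (s : List Int) (r : Int),
    List.Pairwise (fun a b => b ≤ a) s →
    (popLoop s num r).2 = r + ((s.filter (fun x => decide (num < x))).length : Int) ∧
    (popLoop s num r).1 = s.filter (fun x => !decide (num < x)) := by
  intro s
  induction s with
  | nil => intro r _; simp [popLoop]
  | cons x xs ih =>
    intro r hp
    rcases List.pairwise_cons.mp hp with ⟨hall, htail⟩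
    by_cases h : num < x
    · have := ih (r + 1) htail
      simp [popLoop, h, this.1, this.2]
      omega
    · have hx : ∀ y ∈ xs, ¬ num < y := by
        intro y hy
        have := hall y hy
        omega
      have hfilt : xs.filter (fun x => !decide (num < x)) = xs := by
        apply List.filter_eq_self.mpr
        intro y hy; simpa using hx y hy
      have hfilt2 : xs.filter (fun x => decide (num < x)) = [] := by
        apply List.filter_eq_nil_iff.mpr
        intro y hy; simpa using hx y hy
      simp [popLoop, h, hfilt, hfilt2]

theorem filter_split (num : Int) (q : Int → Bool) (h : ∀ x, num < x → q x = true) :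
    ∀ (s : List Int),
    (s.filter q).length = (s.filter (fun x => decide (num < x))).length +
      ((s.filter (fun x => !decide (num < x))).filter q).length := by
  intro s
  induction s with
  | nil => simp
  | cons x xs ih =>
    by_cases hx : num < x
    · simp [hx, h x hx, ih]; omega
    · by_cases hq : q x <;> simp [hx, hq, ih] <;> try omega

theorem A_run : ∀ (t : List Int) (s : List Int) (rem : Int),
    List.Pairwise (fun a b => b ≤ a) s →
    (t.foldl stepA (s, rem)).2 =
      rem + ((s.filter (fun x => t.any (fun u => u < x))).length : Int) + specCount t := by
  intro t
  induction t with
  | nil => intro s rem _; simp [specCount]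
  | cons num t' ih =>
    intro s rem hp
    have hps := popLoop_spec num s rem hp
    set s₂ := (popLoop s num rem).1 with hs₂
    -- s₂ is pairwise and all its elements are ≤ num
    have hs₂le : ∀ y ∈ s₂, y ≤ num := by
      intro y hy
      rw [hps.2] at hy
      have := List.of_mem_filter hy
      simp at this; omega
    have hs₂p : List.Pairwise (fun a b => b ≤ a) s₂ := by
      rw [hps.2]; exact hp.filter _
    have hp2 : List.Pairwise (fun a b => b ≤ a) (num :: s₂) :=
      List.pairwise_cons.mpr ⟨hs₂le, hs₂p⟩
    have hstep : (List.foldl stepA (s, rem) (num :: t')) =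
        (t'.foldl stepA (num :: s₂, (popLoop s num rem).2)) := by
      simp only [List.foldl_cons, stepA, hs₂]
    rw [hstep, ih _ _ hp2]
    have hcons : ((num :: s₂).filter (fun x => t'.any (fun u => u < x))).length
        = (if t'.any (fun u => u < num) then 1 else 0) +
          (s₂.filter (fun x => t'.any (fun u => u < x))).length := by
      by_cases hc : t'.any (fun u => u < num) <;> simp [hc] <;> try omega
    have hq : ∀ x, num < x → ((num :: t').any (fun u => u < x)) = true := by
      intro x hx; simp; exact Or.inl hx
    have hsplit := filter_split num (fun x => (num :: t').any (fun u => u < x)) hq s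
    have hcong : (s.filter (fun x => !decide (num < x))).filter
          (fun x => (num :: t').any (fun u => u < x)) =
        (s.filter (fun x => !decide (num < x))).filter (fun x => t'.any (fun u => u < x)) := by
      apply List.filter_congr
      intro x hx
      have := List.of_mem_filter hx
      simp at this ⊢
      intro h; omega
    rw [hcong] at hsplit
    have hlen : ((s.filter (fun x => (num :: t').any (fun u => u < x))).length : Int)
        = ((s.filter (fun x => decide (num < x))).length : Int)
          + ((s₂.filter (fun x => t'.any (fun u => u < x))).length : Int) := by
      rw [hps.2]; exact_mod_cast hsplit
    rw [hps.1, hcons]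
    simp only [specCount]
    push_cast
    rw [hlen]
    split_ifs <;> ring

-- ---- B side ----

def runMin (m : Int) (l : List Int) : Int := l.foldl min m

def bCount : List Int → Int → Int
  | [], _ => 0
  | u :: r, m => (if m < u then 1 else 0) + bCount r (min m u)

theorem B_fold_some : ∀ (r : List Int) (m c : Int),
    r.foldl stepB (some m, c) = (some (runMin m r), c + bCount r m) := by
  intro r
  induction r with
  | nil => intro m c; simp [runMin, bCount]
  | cons u r' ih =>
    intro m c
    simp only [List.foldl_cons, stepB, runMin, bCount]
    rw [ih (min m u)]
    simp [runMin]
    split_ifs <;> ring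

theorem runMin_lt : ∀ (l : List Int) (m x : Int),
    runMin m l < x ↔ (m < x ∨ ∃ u ∈ l, u < x) := by
  intro l
  induction l with
  | nil => intro m x; simp [runMin]
  | cons u l' ih =>
    intro m x
    have : runMin m (u :: l') = runMin (min m u) l' := by simp [runMin]
    rw [this, ih]
    constructor
    · rintro (h | ⟨v, hv, hvx⟩)
      · rcases min_lt_iff.mp h with h | h
        · exact Or.inl h
        · exact Or.inr ⟨u, List.mem_cons_self .., h⟩
      · exact Or.inr ⟨v, List.mem_cons_of_mem _ hv, hvx⟩
    · rintro (h | ⟨v, hv, hvx⟩)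
      · exact Or.inl (min_lt_iff.mpr (Or.inl h))
      · rcases List.mem_cons.mp hv with rfl | hv
        · exact Or.inl (min_lt_iff.mpr (Or.inr hvx))
        · exact Or.inr ⟨v, hv, hvx⟩

def scount : List Int → Int → Int
  | [], _ => 0
  | x :: xs, m => (if m < x ∨ xs.any (fun u => u < x) then 1 else 0) + scount xs m

theorem bCount_append_single : ∀ (r : List Int) (m x : Int),
    bCount (r ++ [x]) m = bCount r m + (if runMin m r < x then 1 else 0) := by
  intro r
  induction r with
  | nil => intro m x; simp [bCount, runMin]
  | cons u r' ih =>
    intro m x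
    have : runMin m (u :: r') = runMin (min m u) r' := by simp [runMin]
    simp only [List.cons_append, bCount, ih, this]
    ring

theorem bCount_reverse : ∀ (l : List Int) (m : Int),
    bCount l.reverse m = scount l m := by
  intro l
  induction l with
  | nil => intro m; simp [bCount, scount]
  | cons x xs ih =>
    intro m
    have : (x :: xs).reverse = xs.reverse ++ [x] := by simp
    rw [this, bCount_append_single, ih]
    have hiff : runMin m xs.reverse < x ↔ (m < x ∨ ∃ u ∈ xs, u < x) := by
      rw [runMin_lt]; simp
    simp only [scount]
    by_cases h : m < x ∨ ∃ u ∈ xs, u < x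
    · rw [if_pos (hiff.mpr h), if_pos (by simpa using h)]; ring
    · rw [if_neg (fun hh => h (hiff.mp hh)), if_neg (by simpa using h)]; ring

theorem specCount_append_single : ∀ (l : List Int) (y : Int),
    specCount (l ++ [y]) = scount l y := by
  intro l
  induction l with
  | nil => intro y; simp [specCount, scount]
  | cons x l' ih =>
    intro y
    simp only [List.cons_append, specCount, ih, scount]
    by_cases h : y < x ∨ l'.any (fun u => u < x)
    · rw [if_pos (by simpa [or_comm] using h), if_pos (by simpa using h)]
    · rw [if_neg (by simpa [or_comm] using h), if_neg (by simpa using h)]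

theorem B_eq_spec (nums : List Int) : minRemovals_alt nums = specCount nums := by
  unfold minRemovals_alt
  cases hr : nums.reverse with
  | nil =>
    have : nums = [] := by simpa using congrArg List.reverse hr
    simp [this, specCount]
  | cons y r =>
    have hn : nums = r.reverse ++ [y] := by
      have := congrArg List.reverse hr
      simpa using this
    simp only [List.foldl_cons, stepB]
    rw [B_fold_some]
    simp only []
    rw [hn, specCount_append_single, ← bCount_reverse]
    simp

theorem A_eq_spec (nums : List Int) : minRemovals nums = specCount nums := by
  unfold minRemovals
  rw [A_run nums [] 0 (by simp)]
  simp

-- ===== VERDICT (by name: the statement is the Claim_ definition above) =====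
theorem minRemovals_spec : Claim_equal_minRemovals := by
  intro nums _
  unfold Spec_minRemovals
  rw [A_eq_spec, B_eq_spec]
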